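-- pv_equiv track=rewrite | github.com/hasimzc/DataStructuresAndAlgorithms | FirstandLastIndex/main.py | binarySearchForFirstIndex
-- ===== SOURCE A (Python) =====
-- def binarySearchForFirstIndex(target,liste,index):
--     n = len(liste)
--     if n == 1:
--         if liste[0] == target:
--             return index-1
--         else:
--             return index
--     mid = n//2
--     number = liste[mid]
--     if number == target:
--        return binarySearchForFirstIndex(target,liste[:mid],mid)
--     else:
--         if target > number:
--             return binarySearchForFirstIndex(target,liste[mid:],index)
--         else:
--             return binarySearchForFirstIndex(target,liste[:mid],index)
-- ===== SOURCE B (Python) =====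
-- def binarySearchForFirstIndex(target, liste, index):
--     # Index-based iterative binary search over (lo, hi) bounds: no slice copies.
--     lo, hi, idx = 0, len(liste), index
--     while hi - lo > 1:
--         mid = (hi - lo) // 2
--         number = liste[lo + mid]
--         if number == target:
--             hi = lo + mid
--             idx = mid
--         elif target > number:
--             lo += mid
--         else:
--             hi = lo + mid
--     return idx - 1 if liste[lo] == target else idx
-- ===== Notes on version B (the rewrite author's own statement) =====
-- stated objective: alternative
-- what changed: Replaced A's recursion that copies a list slice at every level by an iterative index-based binary search that maintains (lo, hi) bounds over the original list, so no sublists are ever materialised.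
-- outside the precondition, e.g. on binarySearchForFirstIndex(1, [], 0): A raises IndexError, B raises IndexError
import Mathlib
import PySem

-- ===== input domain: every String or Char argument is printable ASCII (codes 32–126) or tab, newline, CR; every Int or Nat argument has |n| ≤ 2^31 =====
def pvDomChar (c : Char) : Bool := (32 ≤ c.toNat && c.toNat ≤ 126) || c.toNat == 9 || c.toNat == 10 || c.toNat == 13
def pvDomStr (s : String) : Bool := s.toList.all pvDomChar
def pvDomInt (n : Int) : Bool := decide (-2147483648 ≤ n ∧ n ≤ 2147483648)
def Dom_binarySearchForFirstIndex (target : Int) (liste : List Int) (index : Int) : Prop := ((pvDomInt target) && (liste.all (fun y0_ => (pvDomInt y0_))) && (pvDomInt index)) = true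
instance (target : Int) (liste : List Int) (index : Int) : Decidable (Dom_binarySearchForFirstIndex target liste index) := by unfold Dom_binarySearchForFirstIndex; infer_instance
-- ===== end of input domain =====

-- B replaces A's slice-copying recursion by an iterative index-based binary search over (lo, hi) bounds.

-- ===== PORT A =====
-- literal transliteration of A as structural recursion on a fuel that only makes it total
-- (each recursive call is on a strictly shorter list, so fuel = length + 1 is never exhausted;
-- on [] Python raises IndexError — excluded by Pre_)
def pvGoA (fuel : Nat) (target : Int) (liste : List Int) (index : Int) : Int :=
  match fuel with
  | 0 => 0
  | fuel + 1 =>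
    let n : Int := liste.length
    if n = 1 then
      if PySem.List.pyGetD liste 0 0 = target then index - 1 else index
    else
      let mid := PySem.Int.floordiv n 2
      let number := PySem.List.pyGetD liste mid 0
      if number = target then
        pvGoA fuel target (PySem.List.slice liste none (some mid)) mid
      else
        if target > number then
          pvGoA fuel target (PySem.List.slice liste (some mid) none) index
        else
          pvGoA fuel target (PySem.List.slice liste none (some mid)) index

def binarySearchForFirstIndex (target : Int) (liste : List Int) (index : Int) : Int :=
  pvGoA (liste.length + 1) target liste index

-- ===== PORT B =====
-- the while loop of Source B as tail recursion on (lo, hi, idx); the post-loop return is the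
-- base case; the fuel only makes it total (hi - lo shrinks every iteration, so fuel = length suffices)
def pvGoB (fuel : Nat) (target : Int) (liste : List Int) (lo hi : Nat) (idx : Int) : Int :=
  match fuel with
  | 0 => idx
  | fuel + 1 =>
    if hi - lo > 1 then
      let mid := (hi - lo) / 2
      let number := PySem.List.pyGetD liste ((lo + mid : Nat) : Int) 0
      if number = target then
        pvGoB fuel target liste lo (lo + mid) (mid : Int)
      else
        if target > number then
          pvGoB fuel target liste (lo + mid) hi idx
        else
          pvGoB fuel target liste lo (lo + mid) idx
    else
      if PySem.List.pyGetD liste ((lo : Nat) : Int) 0 = target then idx - 1 else idx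

def binarySearchForFirstIndex_alt (target : Int) (liste : List Int) (index : Int) : Int :=
  pvGoB (liste.length + 1) target liste 0 liste.length index

-- ===== PRECONDITION & SPEC =====
-- Pre_ excludes only the empty list, on which the Python A raises IndexError (and B does too).
def Pre_binarySearchForFirstIndex (target : Int) (liste : List Int) (index : Int) : Prop := liste ≠ []
instance (target : Int) (liste : List Int) (index : Int) : Decidable (Pre_binarySearchForFirstIndex target liste index) := by unfold Pre_binarySearchForFirstIndex; infer_instance
def pvWitness_binarySearchForFirstIndex : Int × List Int × Int := (3, [1, 2, 3, 3, 5], 0)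

def Spec_binarySearchForFirstIndex (target : Int) (liste : List Int) (index : Int) (out : Int) : Prop := out = binarySearchForFirstIndex_alt target liste index
instance (target : Int) (liste : List Int) (index : Int) (out : Int) : Decidable (Spec_binarySearchForFirstIndex target liste index out) := by unfold Spec_binarySearchForFirstIndex; infer_instance

-- ===== CLAIM (what is proved, stated in full; the proofs are below) =====
def Claim_equal_binarySearchForFirstIndex : Prop := ∀ (target : Int) (liste : List Int) (index : Int), Dom_binarySearchForFirstIndex target liste index → Pre_binarySearchForFirstIndex target liste index → Spec_binarySearchForFirstIndex target liste index (binarySearchForFirstIndex target liste index)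

-- ===== LEMMAS AND PROOFS =====

-- A on the segment liste[lo:hi] equals B's loop on the bounds (lo, hi), for any sufficient fuels.
theorem pv_key (target : Int) (liste : List Int) :
    ∀ (d lo hi : Nat) (idx : Int) (fA fB : Nat), hi - lo = d → lo < hi → hi ≤ liste.length →
      hi - lo ≤ fA → hi - lo ≤ fB →
      pvGoA fA target ((liste.drop lo).take (hi - lo)) idx =
        pvGoB fB target liste lo hi idx := by
  intro d
  induction d using Nat.strong_induction_on with
  | _ d ih =>
    intro lo hi idx fA fB hd hlt hle hfA hfB
    obtain ⟨fA', rfl⟩ : ∃ k, fA = k + 1 := ⟨fA - 1, by omega⟩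
    obtain ⟨fB', rfl⟩ : ∃ k, fB = k + 1 := ⟨fB - 1, by omega⟩
    have hxslen : ((liste.drop lo).take (hi - lo)).length = hi - lo := by
      simp only [List.length_take, List.length_drop]; omega
    rw [pvGoA, pvGoB]
    dsimp only
    rw [hxslen]
    by_cases h1 : hi - lo = 1
    · -- base case: one-element segment
      have hlo : lo < liste.length := by omega
      have hA : PySem.List.pyGetD ((liste.drop lo).take (hi - lo)) 0 0 = liste[lo] := by
        rw [show (0 : Int) = ((0 : Nat) : Int) from rfl, PySem.List.pyGetD_natCast,
            List.getD_eq_getElem _ _ (by omega)]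
        rw [List.getElem_take, List.getElem_drop]
        simp
      have hB : PySem.List.pyGetD liste ((lo : Nat) : Int) 0 = liste[lo] := by
        rw [PySem.List.pyGetD_natCast, List.getD_eq_getElem _ _ hlo]
      rw [h1] at hA
      rw [h1]
      rw [if_pos (by norm_num : ((1 : Nat) : Int) = 1)]
      rw [if_neg (by omega : ¬ (1 : Nat) > 1)]
      rw [hA, hB]
    · -- recursive case: hi - lo ≥ 2
      have hgt : hi - lo > 1 := by omega
      have hn1' : ¬ (((hi - lo : Nat) : Int) = 1) := by
        exact_mod_cast (by omega : ¬ hi - lo = 1)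
      rw [if_neg hn1', if_pos hgt]
      set m : Nat := (hi - lo) / 2 with hm
      have hm1 : 1 ≤ m := by omega
      have hmlt : m < hi - lo := by omega
      have hlomlt : lo + m < liste.length := by omega
      have hfl : PySem.Int.floordiv ((hi - lo : Nat) : Int) 2 = ((m : Nat) : Int) := by
        rw [hm]; exact_mod_cast PySem.Int.floordiv_natCast (hi - lo) 2
      rw [hfl]
      have hnum : PySem.List.pyGetD ((liste.drop lo).take (hi - lo)) ((m : Nat) : Int) 0 =
          PySem.List.pyGetD liste ((lo + m : Nat) : Int) 0 := by
        rw [PySem.List.pyGetD_natCast, PySem.List.pyGetD_natCast,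
            List.getD_eq_getElem _ _ (by rw [hxslen]; omega),
            List.getD_eq_getElem _ _ hlomlt]
        rw [List.getElem_take, List.getElem_drop]
      have hleft : PySem.List.slice ((liste.drop lo).take (hi - lo)) none (some ((m : Nat) : Int)) =
          (liste.drop lo).take ((lo + m) - lo) := by
        rw [PySem.List.slice_to_natCast, List.take_take]
        congr 1; omega
      have hright : PySem.List.slice ((liste.drop lo).take (hi - lo)) (some ((m : Nat) : Int)) none =
          (liste.drop (lo + m)).take (hi - (lo + m)) := by
        rw [PySem.List.slice_from_natCast, List.drop_take, List.drop_drop]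
        congr 1
        omega
      rw [hnum, hleft, hright]
      by_cases heq : PySem.List.pyGetD liste ((lo + m : Nat) : Int) 0 = target
      · rw [if_pos heq, if_pos heq]
        exact ih m (by omega) lo (lo + m) ((m : Nat) : Int) fA' fB'
          (by omega) (by omega) (by omega) (by omega) (by omega)
      · rw [if_neg heq, if_neg heq]
        by_cases hgtc : target > PySem.List.pyGetD liste ((lo + m : Nat) : Int) 0
        · rw [if_pos hgtc, if_pos hgtc]
          exact ih (hi - (lo + m)) (by omega) (lo + m) hi idx fA' fB'
            (by omega) (by omega) (by omega) (by omega) (by omega)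
        · rw [if_neg hgtc, if_neg hgtc]
          exact ih m (by omega) lo (lo + m) idx fA' fB'
            (by omega) (by omega) (by omega) (by omega) (by omega)

-- ===== VERDICT (by name: the statement is the Claim_ definition above) =====
theorem binarySearchForFirstIndex_spec : Claim_equal_binarySearchForFirstIndex := by
  intro target liste index _ hpre
  unfold Spec_binarySearchForFirstIndex binarySearchForFirstIndex binarySearchForFirstIndex_alt
  have hlen : 0 < liste.length := List.length_pos_iff.mpr hpre
  have := pv_key target liste liste.length 0 liste.length index
    (liste.length + 1) (liste.length + 1) (by omega) hlen (le_refl _) (by omega) (by omega)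
  simpa using this
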